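-- pv_equiv track=rewrite | github.com/PolychronMidi/Polychron | scripts/pipeline/hme/compute-blindspots.py | _split_into_rounds
-- ===== SOURCE A (Python) =====
-- def _split_into_rounds(events: list[dict]) -> list[list[dict]]:
--     rounds: list[list[dict]] = []
--     current: list[dict] = []
--     for ev in events:
--         current.append(ev)
--         if ev.get("event") == "round_complete":
--             rounds.append(current)
--             current = []
--     if current:
--         rounds.append(current)
--     return rounds
-- ===== SOURCE B (Python) =====
-- def _split_into_rounds(events: list[dict]) -> list[list[dict]]:
--     boundaries = [i + 1 for i, ev in enumerate(events) if ev.get("event") == "round_complete"]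
--     rounds: list[list[dict]] = []
--     start = 0
--     for b in boundaries:
--         rounds.append(events[start:b])
--         start = b
--     if start < len(events):
--         rounds.append(events[start:])
--     return rounds
-- ===== Notes on version B (the rewrite author's own statement) =====
-- stated objective: alternative
-- what changed: B first collects the boundary indices after each 'round_complete' marker, then cuts the rounds out of the original list by slicing between consecutive boundaries, instead of A's append-and-flush accumulator loop.
import Mathlib
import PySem

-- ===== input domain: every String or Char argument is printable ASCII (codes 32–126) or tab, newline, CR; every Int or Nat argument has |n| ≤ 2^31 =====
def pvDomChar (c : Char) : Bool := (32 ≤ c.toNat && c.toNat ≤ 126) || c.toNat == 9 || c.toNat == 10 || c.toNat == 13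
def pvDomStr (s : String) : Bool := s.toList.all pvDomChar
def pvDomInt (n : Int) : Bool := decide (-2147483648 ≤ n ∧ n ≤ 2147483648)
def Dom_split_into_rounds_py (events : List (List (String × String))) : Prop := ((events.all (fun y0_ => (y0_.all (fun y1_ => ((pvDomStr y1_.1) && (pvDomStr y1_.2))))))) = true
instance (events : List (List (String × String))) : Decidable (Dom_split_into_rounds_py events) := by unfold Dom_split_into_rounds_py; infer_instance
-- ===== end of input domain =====

-- B cuts the rounds out by boundary indices + slicing instead of A's append-and-flush accumulator; alternative decomposition, same behaviour.

-- ev.get("event") == "round_complete"  (dict = association list, lookup = first match)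
def pvIsRC (ev : List (String × String)) : Bool := List.lookup "event" ev == some "round_complete"

-- ===== PORT A =====
def split_into_rounds_py (events : List (List (String × String))) : List (List (List (String × String))) :=
  let st := events.foldl
    (fun (st : List (List (List (String × String))) × List (List (String × String))) ev =>
      let current := st.2 ++ [ev]
      if pvIsRC ev then (st.1 ++ [current], []) else (st.1, current))
    ([], [])
  if st.2.isEmpty then st.1 else st.1 ++ [st.2]

-- ===== PORT B =====
-- [i + 1 for i, ev in enumerate(events) if ev.get("event") == "round_complete"]
def pvBoundaries (events : List (List (String × String))) (i : Nat) : List Nat :=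
  match events with
  | [] => []
  | ev :: rest => if pvIsRC ev then (i + 1) :: pvBoundaries rest (i + 1) else pvBoundaries rest (i + 1)

-- events[start:b] with 0 ≤ start ≤ b ported as (drop start).take (b - start) (= PySem.List.slice_natCast)
def split_into_rounds_py_alt (events : List (List (String × String))) : List (List (List (String × String))) :=
  let boundaries := pvBoundaries events 0
  let st := boundaries.foldl
    (fun (st : List (List (List (String × String))) × Nat) b =>
      (st.1 ++ [(events.drop st.2).take (b - st.2)], b))
    ([], 0)
  if st.2 < events.length then st.1 ++ [events.drop st.2] else st.1

-- ===== PRECONDITION & SPEC =====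
def Spec_split_into_rounds_py (events : List (List (String × String))) (out : List (List (List (String × String)))) : Prop := out = split_into_rounds_py_alt events
instance (events : List (List (String × String))) (out : List (List (List (String × String)))) : Decidable (Spec_split_into_rounds_py events out) := by unfold Spec_split_into_rounds_py; infer_instance

-- ===== CLAIM (what is proved, stated in full; the proofs are below) =====
def Claim_equal_split_into_rounds_py : Prop := ∀ (events : List (List (String × String))), Dom_split_into_rounds_py events → Spec_split_into_rounds_py events (split_into_rounds_py events)

-- ===== LEMMAS AND PROOFS =====

-- reference splitter: A's loop seen as structural recursion with a pending chunk
def pvSplitW (pending : List (List (String × String))) : List (List (String × String)) → List (List (List (String × String)))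
  | [] => if pending.isEmpty then [] else [pending]
  | ev :: rest =>
      if pvIsRC ev then (pending ++ [ev]) :: pvSplitW [] rest else pvSplitW (pending ++ [ev]) rest

-- B's boundary loop seen as structural recursion on the boundary list
def pvChunks (events : List (List (String × String))) (start : Nat) : List Nat → List (List (List (String × String)))
  | [] => if start < events.length then [events.drop start] else []
  | b :: bs => (events.drop start).take (b - start) :: pvChunks events b bs

def pvPrepend (p : List (List (String × String))) (c : List (List (List (String × String)))) : List (List (List (String × String))) :=
  match c with
  | [] => if p.isEmpty then [] else [p]
  | h :: t => (p ++ h) :: t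

theorem pvA_fold (events : List (List (String × String))) :
    ∀ rounds current,
      (let st := events.foldl
        (fun (st : List (List (List (String × String))) × List (List (String × String))) ev =>
          let cur := st.2 ++ [ev]
          if pvIsRC ev then (st.1 ++ [cur], []) else (st.1, cur))
        (rounds, current)
       if st.2.isEmpty then st.1 else st.1 ++ [st.2]) = rounds ++ pvSplitW current events := by
  induction events with
  | nil =>
      intro rounds current
      by_cases h : current.isEmpty <;> simp [pvSplitW, h]
  | cons ev rest ih =>
      intro rounds current
      by_cases h : pvIsRC ev
      · simpa [pvSplitW, h, List.foldl_cons] using ih (rounds ++ [current ++ [ev]]) []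
      · simpa [pvSplitW, h, List.foldl_cons] using ih rounds (current ++ [ev])

theorem pvB_fold (events : List (List (String × String))) (bs : List Nat) :
    ∀ rounds start,
      (let st := bs.foldl
        (fun (st : List (List (List (String × String))) × Nat) b =>
          (st.1 ++ [(events.drop st.2).take (b - st.2)], b))
        (rounds, start)
       if st.2 < events.length then st.1 ++ [events.drop st.2] else st.1) = rounds ++ pvChunks events start bs := by
  induction bs with
  | nil =>
      intro rounds start
      simp [pvChunks]
      by_cases h : start < events.length <;> simp [h]
  | cons b bs ih =>
      intro rounds start
      simpa [pvChunks, List.foldl_cons] using ih (rounds ++ [(events.drop start).take (b - start)]) b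

theorem pvChunks_shift (e : List (String × String)) (es : List (List (String × String)))
    (bs : List Nat) : ∀ s, pvChunks (e :: es) (s + 1) (bs.map (· + 1)) = pvChunks es s bs := by
  induction bs with
  | nil => intro s; simp [pvChunks]
  | cons b bs ih =>
      intro s
      have : b + 1 - (s + 1) = b - s := by omega
      simp [pvChunks, ih, this]

theorem pvBoundaries_shift (events : List (List (String × String))) :
    ∀ i, pvBoundaries events i = (pvBoundaries events 0).map (· + i) := by
  induction events with
  | nil => intro i; simp [pvBoundaries]
  | cons ev rest ih =>
      intro i
      by_cases h : pvIsRC ev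
      · simp [pvBoundaries, h, ih (i + 1), ih 1, List.map_map]
        constructor
        · omega
        · intro a _; omega
      · simp [pvBoundaries, h, ih (i + 1), ih 1, List.map_map]
        intro a _; omega

theorem pvChunks_cons_nonmarker (e : List (String × String)) (es : List (List (String × String)))
    (bs : List Nat) :
    pvChunks (e :: es) 0 (bs.map (· + 1)) = pvPrepend [e] (pvChunks es 0 bs) := by
  cases bs with
  | nil =>
      cases es <;> simp [pvChunks, pvPrepend]
  | cons b bs =>
      have h1 : pvChunks (e :: es) (b + 1) (bs.map (· + 1)) = pvChunks es b bs :=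
        pvChunks_shift e es bs b
      simp [pvChunks, pvPrepend, h1]

theorem pvPrepend_prepend (p : List (List (String × String))) (e : List (String × String))
    (c : List (List (List (String × String)))) :
    pvPrepend p (pvPrepend [e] c) = pvPrepend (p ++ [e]) c := by
  cases c <;> simp [pvPrepend]

theorem pvPrepend_nil (c : List (List (List (String × String)))) : pvPrepend [] c = c := by
  cases c <;> simp [pvPrepend]

theorem pvSplitW_eq_chunks (events : List (List (String × String))) :
    ∀ pending, pvSplitW pending events = pvPrepend pending (pvChunks events 0 (pvBoundaries events 0)) := by
  induction events with
  | nil => intro pending; simp [pvSplitW, pvBoundaries, pvChunks, pvPrepend]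
  | cons ev rest ih =>
      intro pending
      by_cases h : pvIsRC ev
      · have hb : pvBoundaries rest 1 = (pvBoundaries rest 0).map (· + 1) :=
          pvBoundaries_shift rest 1
        have hsh : pvChunks (ev :: rest) 1 ((pvBoundaries rest 0).map (· + 1))
            = pvChunks rest 0 (pvBoundaries rest 0) := pvChunks_shift ev rest _ 0
        simp only [pvSplitW, h, if_pos, pvBoundaries, hb]
        rw [ih [], pvPrepend_nil]
        simp [pvChunks, hsh, pvPrepend]
      · have hb : pvBoundaries rest 1 = (pvBoundaries rest 0).map (· + 1) :=
          pvBoundaries_shift rest 1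
        simp only [pvSplitW, h, if_neg, pvBoundaries, hb, Bool.false_eq_true, not_false_iff]
        rw [ih (pending ++ [ev]), pvChunks_cons_nonmarker, pvPrepend_prepend]

-- ===== VERDICT (by name: the statement is the Claim_ definition above) =====
theorem split_into_rounds_py_spec : Claim_equal_split_into_rounds_py := by
  intro events _
  show split_into_rounds_py events = split_into_rounds_py_alt events
  have hA := pvA_fold events [] []
  have hB := pvB_fold events (pvBoundaries events 0) [] 0
  have hW := pvSplitW_eq_chunks events []
  simp only [split_into_rounds_py, split_into_rounds_py_alt]
  rw [hA, hB, hW, pvPrepend_nil]
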